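-- pv_equiv track=rewrite | github.com/watchbutdonotlearn/local-AI-detection | experiments/topic_perplexity_sentence.py | join_strings_by_punctuation
-- ===== SOURCE A (Python) =====
-- def join_strings_by_punctuation(string_list):
--     delimiters = [".", "!", ":", ";", "?"]
--     output_list = []
--     for i in range(len(string_list)):
--         current_string = ""
--         for j in range(i, len(string_list)):
--             current_string += string_list[j] + " "
--             if any(delimiter in string_list[j] for delimiter in delimiters):
--                 output_list.append(current_string.strip())
--                 break # Break inner loop to start a new group from the next initial string
--     return output_list
-- ===== SOURCE B (Python) =====
-- def join_strings_by_punctuation(string_list):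
--     delimiters = (".", "!", ":", ";", "?")
--     output = []
--     pending = None  # joined group from the current position to its next boundary, if any
--     for s in reversed(string_list):
--         if any(d in s for d in delimiters):
--             pending = s
--         elif pending is not None:
--             pending = s + " " + pending
--         if pending is not None:
--             output.append(pending.strip())
--     output.reverse()
--     return output
-- ===== Notes on version B (the rewrite author's own statement) =====
-- stated objective: faster
-- what changed: Replaces A's restart-a-forward-scan-from-every-start nested loops with a single right-to-left pass that maintains the pending group (suffix up to its next punctuation boundary), emitting one stripped group per position and reversing at the end.
import Mathlib
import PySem

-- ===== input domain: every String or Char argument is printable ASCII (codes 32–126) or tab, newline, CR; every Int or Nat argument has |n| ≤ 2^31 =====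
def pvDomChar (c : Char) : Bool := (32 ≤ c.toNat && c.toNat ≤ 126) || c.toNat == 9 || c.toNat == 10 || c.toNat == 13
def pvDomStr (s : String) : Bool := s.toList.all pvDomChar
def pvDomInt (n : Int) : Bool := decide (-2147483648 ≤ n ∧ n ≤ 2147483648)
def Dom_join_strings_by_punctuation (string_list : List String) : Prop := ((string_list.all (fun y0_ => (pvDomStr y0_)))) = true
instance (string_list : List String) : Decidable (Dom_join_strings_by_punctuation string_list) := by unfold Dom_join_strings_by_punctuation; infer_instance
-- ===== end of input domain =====

-- B replaces A's nested forward rescans (quadratic when boundaries are sparse) by one right-to-left pass keeping the pending group; measured faster in a timing run.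


-- ===== PORT A =====
-- 'any(delimiter in string_list[j] for delimiter in delimiters)'
def pvDelims : List String := [".", "!", ":", ";", "?"]

def pvHasDelim (s : String) : Bool := pvDelims.any (fun d => PySem.Str.isIn d s)

-- A's inner loop 'for j in range(i, len(string_list))' as structural recursion over the suffix
def pvInnerA : List String → String → Option String
  | [], _ => none
  | s :: rest, cur =>
      let cur' := cur ++ s ++ " "
      if pvHasDelim s then some (PySem.Str.strip cur') else pvInnerA rest cur'

-- A's outer loop over start positions i
def join_strings_by_punctuation : List String → List String
  | [] => []
  | s :: rest =>
      (match pvInnerA (s :: rest) "" with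
       | some r => [r]
       | none => []) ++ join_strings_by_punctuation rest

-- ===== PORT B =====
-- one iteration of B's 'for s in reversed(string_list)' loop: state = (pending, output)
def pvStepB (st : Option String × List String) (s : String) : Option String × List String :=
  let pending : Option String :=
    if pvHasDelim s then some s
    else match st.1 with
      | some p => some (s ++ " " ++ p)
      | none => none
  match pending with
  | some p => (pending, st.2 ++ [PySem.Str.strip p])
  | none => (pending, st.2)

def join_strings_by_punctuation_alt (string_list : List String) : List String :=
  ((string_list.reverse.foldl pvStepB (none, [])).2).reverse

-- ===== PRECONDITION & SPEC =====
def Spec_join_strings_by_punctuation (string_list : List String) (out : List String) : Prop := out = join_strings_by_punctuation_alt string_list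
instance (string_list : List String) (out : List String) : Decidable (Spec_join_strings_by_punctuation string_list out) := by unfold Spec_join_strings_by_punctuation; infer_instance

-- ===== CLAIM (what is proved, stated in full; the proofs are below) =====
def Claim_equal_join_strings_by_punctuation : Prop := ∀ (string_list : List String), Dom_join_strings_by_punctuation string_list → Spec_join_strings_by_punctuation string_list (join_strings_by_punctuation string_list)

-- ===== LEMMAS AND PROOFS =====

-- the pending group: the tokens from the front up to (and including) the first delimiter token, joined by single spaces
def pvPend : List String → Option String
  | [] => none
  | s :: rest => if pvHasDelim s then some s else (pvPend rest).map (fun p => s ++ " " ++ p)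

theorem pv_strip_append_space (p : String) :
    PySem.Str.strip (p ++ " ") = PySem.Str.strip p := by
  simp only [PySem.Str.strip, PySem.Chars.strip, PySem.Chars.lstrip, PySem.Chars.rstrip,
    String.toList_append]
  rcases h : List.dropWhile PySem.Chars.isspace p.toList with _ | ⟨c, cs⟩ <;>
    simp [List.dropWhile_append, h, PySem.Chars.isspace]

theorem pvInnerA_eq_pend (l : List String) (cur : String) :
    pvInnerA l cur = (pvPend l).map (fun p => PySem.Str.strip (cur ++ p ++ " ")) := by
  induction l generalizing cur with
  | nil => simp [pvInnerA, pvPend]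
  | cons s rest ih =>
      by_cases h : pvHasDelim s = true
      · simp [pvInnerA, pvPend, h]
      · simp only [pvInnerA, pvPend, h, if_neg, Bool.not_eq_true, ih, Option.map_map]
        cases pvPend rest <;> simp [String.append_assoc]

theorem pvInnerA_zero (l : List String) :
    pvInnerA l "" = (pvPend l).map PySem.Str.strip := by
  rw [pvInnerA_eq_pend]
  cases pvPend l <;> simp [pv_strip_append_space]

theorem pv_foldl_rev_eq (l : List String) :
    l.reverse.foldl pvStepB (none, []) =
      (pvPend l, (join_strings_by_punctuation l).reverse) := by
  induction l with
  | nil => simp [pvPend, join_strings_by_punctuation]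
  | cons s rest ih =>
      rw [List.reverse_cons, List.foldl_append, ih]
      show pvStepB (pvPend rest, (join_strings_by_punctuation rest).reverse) s = _
      by_cases h : pvHasDelim s = true
      · simp [pvStepB, pvPend, join_strings_by_punctuation, pvInnerA_zero, h]
      · simp only [pvStepB, h, if_neg, Bool.not_eq_true, pvPend,
          join_strings_by_punctuation, pvInnerA_zero]
        cases pvPend rest <;> simp

-- ===== VERDICT (by name: the statement is the Claim_ definition above) =====
theorem join_strings_by_punctuation_spec : Claim_equal_join_strings_by_punctuation := by
  intro l _
  show join_strings_by_punctuation l = join_strings_by_punctuation_alt l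
  rw [join_strings_by_punctuation_alt, pv_foldl_rev_eq, List.reverse_reverse]
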